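-- pv_equiv track=rewrite | github.com/NYU-NEWS/janus | pylib/placement_strategy.py | hosts_by_datacenter
-- ===== SOURCE A (Python) =====
-- def hosts_by_datacenter(hosts, data_centers):
-- 	if len(data_centers) == 0:
-- 		return {'': sorted(hosts)}
-- 	else:
-- 		result = {}
--
-- 		for dc in data_centers:
-- 			result[dc] = []
--
-- 		for h in hosts:
-- 			for dc in data_centers:
-- 				if h.find(dc)==0:
-- 					result[dc].append(h)
-- 					break
--
-- 		sorted_result = { dc: sorted(value) for (dc, value) in result.items() }
-- 		return sorted_result
-- ===== SOURCE B (Python) =====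
-- def hosts_by_datacenter(hosts, data_centers):
--     if not data_centers:
--         return {'': sorted(hosts)}
--     shosts = sorted(hosts)
--     first = [next((d for d in data_centers if h.startswith(d)), None) for h in shosts]
--     return {dc: [h for h, f in zip(shosts, first) if f == dc] for dc in data_centers}
-- ===== Notes on version B (the rewrite author's own statement) =====
-- stated objective: simpler
-- what changed: A mutates a dict per host and then sorts every bucket; B sorts the hosts once up front, computes each host's first matching datacenter once, and builds each bucket as a comprehension over the pre-sorted (host, first-match) pairs, so the per-bucket sorts and the mutable accumulator disappear.
import Mathlib
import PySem

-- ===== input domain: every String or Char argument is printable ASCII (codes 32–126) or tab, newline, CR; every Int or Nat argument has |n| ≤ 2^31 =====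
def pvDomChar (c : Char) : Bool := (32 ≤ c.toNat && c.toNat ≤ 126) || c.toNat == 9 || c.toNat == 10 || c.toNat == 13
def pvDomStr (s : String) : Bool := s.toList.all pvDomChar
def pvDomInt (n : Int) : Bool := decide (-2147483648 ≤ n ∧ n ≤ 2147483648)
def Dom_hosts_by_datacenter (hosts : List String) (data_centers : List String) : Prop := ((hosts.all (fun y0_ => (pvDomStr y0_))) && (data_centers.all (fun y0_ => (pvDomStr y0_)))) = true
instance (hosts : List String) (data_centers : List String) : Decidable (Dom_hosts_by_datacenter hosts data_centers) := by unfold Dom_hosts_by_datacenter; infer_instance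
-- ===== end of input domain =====

-- B replaces A's per-host dict mutation followed by a sort of every bucket with one
-- up-front sort of the hosts and a per-datacenter filter of that sorted list (simpler).

-- ===== PORT A =====
-- inner 'for dc in data_centers: if h.find(dc)==0: result[dc].append(h); break' loop;
-- the matching dc is always already a key of the dict, so modify's default [] never fires.
def placeHost (d : PySem.Dict String (List String)) (h : String) (dcs : List String) :
    PySem.Dict String (List String) :=
  match dcs with
  | [] => d
  | dc :: rest =>
      if PySem.Str.find h dc == 0 then d.modify dc [] (· ++ [h])
      else placeHost d h rest

def hosts_by_datacenter (hosts : List String) (data_centers : List String) : List (String × List String) :=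
  if data_centers.length == 0 then
    [("", PySem.List.sorted hosts (fun x => x))]
  else
    let result := data_centers.foldl (fun d dc => d.insert dc ([] : List String)) PySem.Dict.empty
    let result := hosts.foldl (fun d h => placeHost d h data_centers) result
    result.items.map (fun p => (p.1, PySem.List.sorted p.2 (fun x => x)))

-- ===== PORT B =====
-- next((d for d in data_centers if h.startswith(d)), None)
def firstMatch (dcs : List String) (h : String) : Option String :=
  match dcs with
  | [] => none
  | dc :: rest => if PySem.Str.startswith h dc then some dc else firstMatch rest h

def hosts_by_datacenter_alt (hosts : List String) (data_centers : List String) : List (String × List String) :=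
  match data_centers with
  | [] => [("", PySem.List.sorted hosts (fun x => x))]
  | _ =>
    let shosts := PySem.List.sorted hosts (fun x => x)
    let first := shosts.map (fun h => firstMatch data_centers h)
    (PySem.List.dedup data_centers).map
      (fun dc => (dc, ((shosts.zip first).filter (fun q => q.2 == some dc)).map Prod.fst))

-- ===== PRECONDITION & SPEC =====
def Spec_hosts_by_datacenter (hosts : List String) (data_centers : List String) (out : List (String × List String)) : Prop := out = hosts_by_datacenter_alt hosts data_centers
instance (hosts : List String) (data_centers : List String) (out : List (String × List String)) : Decidable (Spec_hosts_by_datacenter hosts data_centers out) := by unfold Spec_hosts_by_datacenter; infer_instance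

-- ===== CLAIM (what is proved, stated in full; the proofs are below) =====
def Claim_equal_hosts_by_datacenter : Prop := ∀ (hosts : List String) (data_centers : List String), Dom_hosts_by_datacenter hosts data_centers → Spec_hosts_by_datacenter hosts data_centers (hosts_by_datacenter hosts data_centers)

-- ===== LEMMAS AND PROOFS =====

-- h.find(dc) == 0 is exactly h.startswith(dc)
theorem find_zero_eq_startswith (h dc : String) :
    (PySem.Str.find h dc == 0) = PySem.Str.startswith h dc := by
  rw [PySem.Str.find_eq, PySem.Str.startswith_eq]
  by_cases hp : dc.toList <+: h.toList
  · have h0 : 0 ≤ PySem.Chars.find h.toList dc.toList :=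
      (PySem.Chars.find_nonneg_iff _ _).mpr hp.isInfix
    obtain ⟨-, hmin⟩ := PySem.Chars.find_spec h0
    have : (PySem.Chars.find h.toList dc.toList).toNat = 0 := by
      by_contra hne
      exact hmin 0 (Nat.pos_of_ne_zero hne) (by simpa using hp)
    have hfind : PySem.Chars.find h.toList dc.toList = 0 := by omega
    simp [hfind, (PySem.Chars.startswith_iff _ _).mpr hp]
  · have : PySem.Chars.find h.toList dc.toList ≠ 0 := by
      intro h0
      obtain ⟨hpre, -⟩ := PySem.Chars.find_spec (s := h.toList) (sub := dc.toList) (by omega)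
      rw [h0] at hpre
      exact hp (by simpa using hpre)
    have hsw : PySem.Chars.startswith h.toList dc.toList = false := by
      rw [← Bool.not_eq_true, PySem.Chars.startswith_iff]; exact hp
    simp [this, hsw]

theorem placeHost_getD (d : PySem.Dict String (List String)) (h : String) (dcs : List String) (k : String) :
    (placeHost d h dcs).getD k [] =
      if firstMatch dcs h == some k then d.getD k [] ++ [h] else d.getD k [] := by
  induction dcs with
  | nil => simp [placeHost, firstMatch]
  | cons dc rest ih =>
    rw [placeHost, firstMatch, find_zero_eq_startswith]
    by_cases hm : PySem.Str.startswith h dc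
    · simp only [hm, if_true]
      rw [PySem.Dict.getD_modify]
      by_cases hk : k = dc <;> simp [hk]
      exact fun he => hk he.symm
    · simp only [hm]
      simpa using ih

theorem keys_insert_of_mem (d : PySem.Dict String (List String)) (k : String) (v : List String)
    (hk : k ∈ d.keys) : (d.insert k v).keys = d.keys := by
  have hc : d.contains k = true := by
    simp only [PySem.Dict.keys, List.mem_map] at hk
    obtain ⟨p, hp, hpk⟩ := hk
    simp only [PySem.Dict.contains]
    exact List.any_eq_true.mpr ⟨p, hp, by simp [hpk]⟩
  simp only [PySem.Dict.insert, hc, if_pos, PySem.Dict.keys, List.map_map]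
  apply List.map_congr_left
  intro p _
  by_cases hpk : p.1 = k <;> simp [hpk]

theorem placeHost_keys (d : PySem.Dict String (List String)) (h : String) (dcs : List String)
    (hsub : ∀ dc ∈ dcs, dc ∈ d.keys) : (placeHost d h dcs).keys = d.keys := by
  induction dcs with
  | nil => simp [placeHost]
  | cons dc rest ih =>
    rw [placeHost]
    by_cases hm : PySem.Str.find h dc == 0
    · simp only [hm, if_true, PySem.Dict.modify]
      exact keys_insert_of_mem d dc _ (hsub dc (by simp))
    · simp only [hm]
      exact ih (fun x hx => hsub x (by simp [hx]))

theorem foldl_place_keys (hosts : List String) (d : PySem.Dict String (List String)) (dcs : List String)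
    (hsub : ∀ dc ∈ dcs, dc ∈ d.keys) :
    (hosts.foldl (fun d h => placeHost d h dcs) d).keys = d.keys := by
  induction hosts generalizing d with
  | nil => rfl
  | cons h rest ih =>
    rw [List.foldl_cons, ih _ (fun x hx => (placeHost_keys d h dcs hsub) ▸ hsub x hx),
      placeHost_keys d h dcs hsub]

theorem foldl_place_getD (hosts : List String) (d : PySem.Dict String (List String)) (dcs : List String) (k : String) :
    (hosts.foldl (fun d h => placeHost d h dcs) d).getD k [] =
      d.getD k [] ++ hosts.filter (fun h => firstMatch dcs h == some k) := by
  induction hosts generalizing d with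
  | nil => simp
  | cons h rest ih =>
    rw [List.foldl_cons, ih, placeHost_getD, List.filter_cons]
    by_cases hm : firstMatch dcs h == some k <;> simp [hm]

theorem init_keys (dcs : List String) :
    (dcs.foldl (fun d dc => d.insert dc ([] : List String)) PySem.Dict.empty).keys
      = PySem.List.dedup dcs := by
  rw [PySem.Dict.keys_foldl_insert dcs (fun _ _ => ([] : List String)) PySem.Dict.empty,
    PySem.List.dedup_eq_ofList]
  rfl

theorem init_getD (dcs : List String) (k : String) :
    (dcs.foldl (fun d dc => d.insert dc ([] : List String)) PySem.Dict.empty).getD k [] = [] := by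
  suffices H : ∀ (d : PySem.Dict String (List String)), (∀ k', d.getD k' [] = []) →
      (dcs.foldl (fun d dc => d.insert dc ([] : List String)) d).getD k [] = [] by
    exact H PySem.Dict.empty (fun _ => rfl)
  induction dcs with
  | nil => intro d hd; exact hd k
  | cons dc rest ih =>
    intro d hd
    rw [List.foldl_cons]
    apply ih
    intro k'
    by_cases hk : k' = dc
    · rw [hk, PySem.Dict.getD_insert_self]
    · rw [PySem.Dict.getD_insert_of_ne _ _ _ hk]; exact hd k'

-- a dict with Nodup keys is determined pointwise: items = keys.map (k, getD k [])
theorem items_eq_keys_map (l : List (String × List String))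
    (hn : (l.map Prod.fst).Nodup) :
    l = (l.map Prod.fst).map (fun k => (k, (PySem.Dict.mk l).getD k [])) := by
  induction l with
  | nil => rfl
  | cons p rest ih =>
    obtain ⟨k, v⟩ := p
    simp only [List.map_cons, List.nodup_cons] at hn ⊢
    have hhead : ({ items := (k, v) :: rest } : PySem.Dict String (List String)).getD k [] = v := by
      simp [PySem.Dict.getD, PySem.Dict.get?_mk_cons]
    rw [hhead]
    congr 1
    conv_lhs => rw [ih hn.2]
    apply List.map_congr_left
    intro k' hk'
    have hne : (k == k') = false := by
      simp only [beq_eq_false_iff_ne]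
      intro he; exact hn.1 (he ▸ hk')
    simp [PySem.Dict.getD, PySem.Dict.get?_mk_cons, hne]

theorem sorted_filter (hosts : List String) (p : String → Bool) :
    PySem.List.sorted (hosts.filter p) (fun x => x) =
      (PySem.List.sorted hosts (fun x => x)).filter p := by
  apply PySem.List.sorted_id_eq_of_perm_of_pairwise
  · exact (PySem.List.sorted_perm hosts (fun x => x) false).filter p
  · exact (PySem.List.sorted_pairwise hosts (fun x => x)).filter p

-- [h for h, f in zip(xs, map f xs) if p f] is just a filter of xs
theorem zip_map_filter (xs : List String) (f : String → Option String) (k : String) :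
    (((xs.zip (xs.map f)).filter (fun q => q.2 == some k)).map Prod.fst)
      = xs.filter (fun x => f x == some k) := by
  induction xs with
  | nil => rfl
  | cons x rest ih =>
    simp only [List.map_cons, List.zip_cons_cons, List.filter_cons]
    by_cases hp : f x == some k <;> simp [hp, ih]

-- ===== VERDICT (by name: the statement is the Claim_ definition above) =====
theorem hosts_by_datacenter_spec : Claim_equal_hosts_by_datacenter := by
  intro hosts dcs _
  unfold Spec_hosts_by_datacenter hosts_by_datacenter hosts_by_datacenter_alt
  cases dcs with
  | nil => simp
  | cons dc0 rest =>
    rw [if_neg (by simp : ¬((dc0 :: rest).length == 0) = true)]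
    set dcs := dc0 :: rest with hdcs
    set d1 := dcs.foldl (fun d dc => d.insert dc ([] : List String)) PySem.Dict.empty with hd1
    set dF := hosts.foldl (fun d h => placeHost d h dcs) d1 with hdF
    have hkeys1 : d1.keys = PySem.List.dedup dcs := init_keys dcs
    have hsub : ∀ dc ∈ dcs, dc ∈ d1.keys := by
      intro dc hdc; rw [hkeys1]
      simp only [PySem.List.mem_dedup]; exact hdc
    have hkeysF : dF.keys = PySem.List.dedup dcs := by
      rw [hdF, foldl_place_keys hosts d1 dcs hsub, hkeys1]
    have hnodup : (dF.items.map Prod.fst).Nodup := by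
      have : dF.items.map Prod.fst = dF.keys := rfl
      rw [this, hkeysF]; exact PySem.List.nodup_dedup dcs
    have hmk : PySem.Dict.mk dF.items = dF := rfl
    calc dF.items.map (fun p => (p.1, PySem.List.sorted p.2 (fun x => x)))
        = ((dF.items.map Prod.fst).map (fun k => (k, (PySem.Dict.mk dF.items).getD k []))).map
            (fun p => (p.1, PySem.List.sorted p.2 (fun x => x))) := by
          conv_lhs => rw [items_eq_keys_map dF.items hnodup]
      _ = (PySem.List.dedup dcs).map
            (fun k => (k, PySem.List.sorted (dF.getD k []) (fun x => x))) := by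
          rw [List.map_map]
          have : dF.items.map Prod.fst = dF.keys := rfl
          rw [this, hkeysF, hmk]
          rfl
      _ = (PySem.List.dedup dcs).map
            (fun k => (k, ((((PySem.List.sorted hosts (fun x => x)).zip
                ((PySem.List.sorted hosts (fun x => x)).map (fun h => firstMatch dcs h))).filter
                (fun q => q.2 == some k)).map Prod.fst))) := by
          apply List.map_congr_left
          intro k _
          have hgd : dF.getD k [] = hosts.filter (fun h => firstMatch dcs h == some k) := by
            rw [hdF, foldl_place_getD, init_getD]; rfl
          rw [hgd, sorted_filter, zip_map_filter]
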